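-- pv_equiv track=rewrite | github.com/nownabe/competitive_programming | AtCoder/ABC009C_dict_order_again.py | search
-- ===== SOURCE A (Python) =====
-- def search(n, k, s):
--     from collections import Counter
--
--     counter_s = Counter(s)
--
--     def count_diff(s1, s2):
--         count = 0
--         for i in range(len(s1)):
--             if s1[i] != s2[i]:
--                 count += 1
--
--         return count
--
--     def count_same_chars(chars1, chars2):
--         chars1 = list(chars1)[:]
--         chars2 = list(chars2)[:]
--
--         if len(chars1) < len(chars2):
--             chars1, chars2 = chars2, chars1
--
--         count = 0
--
--         for c in chars1:
--             if c in chars2: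
--                 chars2.remove(c)
--                 count += 1
--
--         return count
--
--     def is_able_to_add(t, c, sorted_s):
--         if counter_s[c] <= Counter(t)[c]:
--             return False
--
--         diff1 = count_diff(t + c, s[:len(t) + 1])
--
--         rest_s = s[len(t) + 1:]
--         rest_sorted = sorted_s[:]
--         rest_sorted.remove(c)
--         diff2 = len(rest_s) - count_same_chars(rest_s, rest_sorted)
--
--         if diff1 + diff2 <= k:
--             return True
--
--     sorted_s = list(sorted(s))
--     t = ''
--
--     for i in range(n):
--         for c in sorted_s:
--             if is_able_to_add(t, c, sorted_s):
--                 t += c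
--                 sorted_s.remove(c)
--                 break
--
--     return t
-- ===== SOURCE B (Python) =====
-- def search(n, k, s):
--     from collections import Counter
--
--     m = len(s)
--     rem = Counter(s)            # multiset of characters of s not yet used in t
--     cand = sorted(rem)          # distinct characters of s, ascending (key set never changes)
--     t = []
--     acc = 0                     # mismatches between t and s[:len(t)], maintained incrementally
--     for _ in range(n):
--         pos = len(t)
--         rest = Counter(s[pos + 1:])
--         for c in cand:
--             if rem[c] <= 0:
--                 continue
--             d1 = acc + (1 if c != s[pos] else 0)
--             inter = sum(min(rest[x], rem[x] - (1 if x == c else 0)) for x in rest)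
--             if d1 + (m - pos - 1 - inter) <= k:
--                 t.append(c)
--                 acc = d1
--                 rem[c] -= 1
--                 break
--     return ''.join(t)
-- ===== Notes on version B (the rewrite author's own statement) =====
-- stated objective: faster
-- what changed: The per-candidate remove-one-by-one multiset matching and recounted prefix diffs are replaced by a greedy loop that maintains a Counter of the unused characters and the running prefix-mismatch count, computing the suffix match size as a Counter min-intersection sum over the distinct alphabet, so each candidate test costs O(alphabet) instead of O(n^2).
import Mathlib
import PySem

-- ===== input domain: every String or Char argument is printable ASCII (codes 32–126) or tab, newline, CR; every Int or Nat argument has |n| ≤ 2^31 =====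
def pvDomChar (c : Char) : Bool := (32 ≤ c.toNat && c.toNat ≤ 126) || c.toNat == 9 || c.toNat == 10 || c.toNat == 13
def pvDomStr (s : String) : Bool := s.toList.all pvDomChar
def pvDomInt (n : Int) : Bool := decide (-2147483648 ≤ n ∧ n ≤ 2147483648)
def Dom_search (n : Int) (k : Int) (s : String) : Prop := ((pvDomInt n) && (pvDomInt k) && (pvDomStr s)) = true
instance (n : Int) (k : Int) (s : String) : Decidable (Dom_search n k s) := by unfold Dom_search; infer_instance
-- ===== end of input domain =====

-- B replaces A's per-candidate recount/remove-loop machinery by an incrementally maintained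
-- Counter of unused characters plus a running prefix-mismatch count (objective: faster).

-- ===== PORT A =====
-- count_diff: indices are always in range in A's uses (equal-length arguments), so the
-- pyGetD default ' ' is never returned.
def pvCountDiff (s1 s2 : List Char) : Int :=
  (PySem.List.pyRange 0 (s1.length : Int) 1).foldl
    (fun count i =>
      if PySem.List.pyGetD s1 i ' ' ≠ PySem.List.pyGetD s2 i ' ' then count + 1 else count) 0

-- count_same_chars: 'if c in chars2: chars2.remove(c); count += 1' — remove? is some exactly
-- when the membership test succeeds.
def pvCountSame (chars1 chars2 : List Char) : Int :=
  let p := if chars1.length < chars2.length then (chars2, chars1) else (chars1, chars2)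
  (p.1.foldl
    (fun st c =>
      match PySem.List.remove? st.1 c with
      | some rest => (rest, st.2 + 1)
      | none => st) (p.2, (0 : Int))).2

-- is_able_to_add; the 'none' branch of remove? is Python's ValueError, unreachable in A's
-- loop because every scanned c is an element of sorted_s.
def pvIsAble (cs : List Char) (counterS : PySem.Dict Char Int) (k : Int)
    (t : List Char) (c : Char) (sortedS : List Char) : Bool :=
  if counterS.getD c 0 ≤ (PySem.Dict.counter t).getD c 0 then false
  else
    let diff1 := pvCountDiff (t ++ [c]) (PySem.List.slice cs none (some ((t.length : Int) + 1)))
    let restS := PySem.List.slice cs (some ((t.length : Int) + 1)) none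
    match PySem.List.remove? sortedS c with
    | none => false
    | some restSorted =>
      let diff2 := (restS.length : Int) - pvCountSame restS restSorted
      decide (diff1 + diff2 ≤ k)

-- one pass of A's outer loop: scan sorted_s for the first addable c, append it, remove it
def pvStepA (cs : List Char) (counterS : PySem.Dict Char Int) (k : Int)
    (st : List Char × List Char) : List Char × List Char :=
  match st.2.find? (fun c => pvIsAble cs counterS k st.1 c st.2) with
  | some c => (st.1 ++ [c], (PySem.List.remove? st.2 c).getD st.2)
  | none => st

def search (n : Int) (k : Int) (s : String) : String :=
  let cs := s.toList
  let counterS := PySem.Dict.counter cs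
  let res := (PySem.List.pyRange 0 n 1).foldl
    (fun st _ => pvStepA cs counterS k st)
    (([] : List Char), PySem.List.sorted cs (fun x => x) false)
  String.ofList res.1

-- ===== PORT B =====
-- sum(min(rest[x], rem[x] - (1 if x == c else 0)) for x in rest)
def pvInterSum (rest rem : PySem.Dict Char Int) (c : Char) : Int :=
  rest.keys.foldl
    (fun acc x => acc + min (rest.getD x 0) (rem.getD x 0 - (if x = c then 1 else 0))) 0

-- the inner candidate test of Source B; s[pos] is only reached with rem[c] > 0, which forces
-- pos < len(s), so the pyGetD default ' ' is never returned
def pvTestB (cs : List Char) (k : Int) (rest rem : PySem.Dict Char Int)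
    (pos : Nat) (acc : Int) (c : Char) : Bool :=
  if rem.getD c 0 ≤ 0 then false
  else
    let d1 := acc + (if c ≠ PySem.List.pyGetD cs (pos : Int) ' ' then 1 else 0)
    let inter := pvInterSum rest rem c
    decide (d1 + ((cs.length : Int) - (pos : Int) - 1 - inter) ≤ k)

-- one pass of Source B's outer loop over state (t, rem, acc); on a hit, acc becomes the d1
-- computed for the accepted candidate
def pvStepB (cs : List Char) (k : Int) (cand : List Char)
    (st : List Char × PySem.Dict Char Int × Int) : List Char × PySem.Dict Char Int × Int :=
  let pos := st.1.length
  let rest := PySem.Dict.counter (PySem.List.slice cs (some ((pos : Int) + 1)) none)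
  match cand.find? (fun c => pvTestB cs k rest st.2.1 pos st.2.2 c) with
  | some c =>
      (st.1 ++ [c], st.2.1.modify c 0 (· - 1),
       st.2.2 + (if c ≠ PySem.List.pyGetD cs (pos : Int) ' ' then 1 else 0))
  | none => st

def search_alt (n : Int) (k : Int) (s : String) : String :=
  let cs := s.toList
  let rem0 := PySem.Dict.counter cs
  let cand := PySem.List.sorted rem0.keys (fun x => x) false
  let res := (PySem.List.pyRange 0 n 1).foldl
    (fun st _ => pvStepB cs k cand st)
    (([] : List Char), rem0, (0 : Int))
  String.ofList res.1

-- ===== PRECONDITION & SPEC =====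
def Spec_search (n : Int) (k : Int) (s : String) (out : String) : Prop := out = search_alt n k s
instance (n : Int) (k : Int) (s : String) (out : String) : Decidable (Spec_search n k s out) := by unfold Spec_search; infer_instance

-- ===== CLAIM (what is proved, stated in full; the proofs are below) =====
def Claim_equal_search : Prop := ∀ (n : Int) (k : Int) (s : String), Dom_search n k s → Spec_search n k s (search n k s)

-- ===== LEMMAS AND PROOFS =====

-- mismatch count between t and the corresponding prefix of cs (zip truncates)
def pvMdiff (t cs : List Char) : Int :=
  ((t.zip cs).countP (fun p => decide (p.1 ≠ p.2)) : Int)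

-- the invariant tying A's state (t, ss) to B's state (t, rem, acc)
structure PvInv (cs : List Char) (ss : List Char) (rem : PySem.Dict Char Int) (t : List Char)
    (acc : Int) : Prop where
  sorted : ss.Pairwise (· ≤ ·)
  count : ∀ x, rem.getD x 0 = (ss.count x : Int)
  sub : ∀ x ∈ ss, x ∈ cs
  accEq : acc = pvMdiff t cs
  len : t.length + ss.length = cs.length
  split : ∀ x, t.count x + ss.count x = cs.count x

-- ---------- count_diff ----------
theorem pv_countP_range_zip (l1 l2 : List Char) (h : l1.length ≤ l2.length) :
    (List.range l1.length).countP (fun i => decide (l1.getD i ' ' ≠ l2.getD i ' '))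
      = (l1.zip l2).countP (fun p => decide (p.1 ≠ p.2)) := by
  induction l1 generalizing l2 with
  | nil => simp
  | cons a t ih =>
    cases l2 with
    | nil => simp at h
    | cons b u =>
      simp only [List.length_cons, List.range_succ_eq_map, List.countP_cons, List.countP_map,
        List.zip_cons_cons]
      have key : (List.range t.length).countP
          ((fun i => decide ((a :: t).getD i ' ' ≠ (b :: u).getD i ' ')) ∘ Nat.succ)
          = (List.range t.length).countP (fun i => decide (t.getD i ' ' ≠ u.getD i ' ')) :=
        List.countP_congr (by intro i hi; simp)
      rw [key, ih u (by simpa using h)]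
      simp

theorem pv_cd_eq (l1 l2 : List Char) (h : l1.length ≤ l2.length) :
    pvCountDiff l1 l2 = pvMdiff l1 l2 := by
  unfold pvCountDiff pvMdiff
  rw [PySem.List.foldl_ite_add_one
    (p := fun i => PySem.List.pyGetD l1 i ' ' ≠ PySem.List.pyGetD l2 i ' ')]
  rw [PySem.List.pyRange_zero_natCast]
  simp only [List.countP_map]
  have key : (List.range l1.length).countP
      ((fun x : Int => decide (PySem.List.pyGetD l1 x ' ' ≠ PySem.List.pyGetD l2 x ' ')) ∘ (fun k : Nat => (k : Int)))
      = (List.range l1.length).countP (fun i => decide (l1.getD i ' ' ≠ l2.getD i ' ')) :=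
    List.countP_congr (by intro i hi; simp [PySem.List.pyGetD_natCast])
  rw [key, pv_countP_range_zip l1 l2 h]
  simp

-- ---------- prefix-mismatch bookkeeping ----------
theorem pv_mdiff_append (t cs : List Char) (c : Char) (h : t.length < cs.length) :
    pvMdiff (t ++ [c]) cs
      = pvMdiff t cs + (if c ≠ cs[t.length]'h then 1 else 0) := by
  induction t generalizing cs with
  | nil =>
    cases cs with
    | nil => simp at h
    | cons b u => by_cases hc : c = b <;> simp [pvMdiff, hc]
  | cons a t ih =>
    cases cs with
    | nil => simp at h
    | cons b u =>
      have := ih u (by simpa using h)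
      simp only [pvMdiff, List.cons_append, List.zip_cons_cons, List.countP_cons,
        List.length_cons, List.getElem_cons_succ] at this ⊢
      split_ifs at this ⊢ <;> push_cast at this ⊢ <;> omega

-- zip truncates: comparing against the prefix is comparing against the whole
theorem pv_zip_take (t cs : List Char) (m : Nat) (h : t.length ≤ m) :
    t.zip (cs.take m) = t.zip cs := by
  induction t generalizing cs m with
  | nil => simp
  | cons a t ih =>
    cases cs with
    | nil => rw [List.take_nil]
    | cons b u =>
      cases m with
      | zero => simp at h
      | succ m => simp [ih u m (by simpa using h)]

theorem pv_mdiff_take (t cs : List Char) (m : Nat) (h : t.length ≤ m) :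
    pvMdiff t (cs.take m) = pvMdiff t cs := by
  simp [pvMdiff, pv_zip_take t cs m h]

-- ---------- the remove-loop computes the multiset-intersection size ----------
theorem pv_csc_loop (a : List Char) : ∀ (b : List Char) (acc : Int),
    (a.foldl (fun st c =>
        match PySem.List.remove? st.1 c with
        | some rest => (rest, st.2 + 1)
        | none => st) (b, acc)).2
      = acc + ((↑a ∩ ↑b : Multiset Char)).card := by
  induction a with
  | nil => intro b acc; simp
  | cons c a ih =>
    intro b acc
    by_cases hc : c ∈ b
    · rw [List.foldl_cons]
      rw [PySem.List.remove?_eq_some_erase b c hc]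
      simp only []
      rw [ih (b.erase c) (acc + 1)]
      have : ((↑(c :: a) ∩ ↑b : Multiset Char)).card
          = ((↑a ∩ ↑(b.erase c) : Multiset Char)).card + 1 := by
        rw [show ((c :: a : List Char) : Multiset Char) = c ::ₘ (↑a) from rfl]
        rw [Multiset.cons_inter_of_pos _ (by simpa using hc)]
        rw [← Multiset.coe_erase]
        simp
      omega
    · rw [List.foldl_cons]
      have hrem : PySem.List.remove? b c = none := by
        rw [PySem.List.remove?_eq_none_iff]; exact hc
      rw [hrem]
      simp only []
      rw [ih b acc]
      have : ((↑(c :: a) ∩ ↑b : Multiset Char)).card = ((↑a ∩ ↑b : Multiset Char)).card := by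
        rw [show ((c :: a : List Char) : Multiset Char) = c ::ₘ (↑a) from rfl]
        rw [Multiset.cons_inter_of_neg _ (by simpa using hc)]
      omega

theorem pv_csc_eq (a b : List Char) (h : a.length = b.length) :
    pvCountSame a b = ((↑a ∩ ↑b : Multiset Char)).card := by
  unfold pvCountSame
  rw [if_neg (by omega)]
  simpa using pv_csc_loop a b 0

-- ---------- the Counter min-sum computes the same intersection size ----------
theorem pv_sum_min_eq_inter (aC bC : List Char) :
    (∑ x ∈ aC.toFinset, min (aC.count x) (bC.count x))
      = ((↑aC ∩ ↑bC : Multiset Char)).card := by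
  have hsub : ((↑aC ∩ ↑bC : Multiset Char)).toFinset ⊆ aC.toFinset := by
    intro x hx
    simp only [Multiset.mem_toFinset, Multiset.mem_inter, Multiset.mem_coe] at hx
    simpa using hx.1
  rw [← Multiset.toFinset_sum_count_eq (↑aC ∩ ↑bC : Multiset Char)]
  rw [Finset.sum_subset hsub]
  · exact Finset.sum_congr rfl (fun x _ => by
      rw [Multiset.count_inter]; simp)
  · intro x _ hx
    simp only [Multiset.mem_toFinset] at hx
    exact Multiset.count_eq_zero.mpr hx

theorem pv_interSum_eq (aC bC : List Char) (rest rem : PySem.Dict Char Int) (c : Char)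
    (hkeys : rest.keys = PySem.Set.ofList aC)
    (hrest : ∀ x, rest.getD x 0 = (aC.count x : Int))
    (hrem : ∀ x, rem.getD x 0 - (if x = c then 1 else 0) = (bC.count x : Int)) :
    pvInterSum rest rem c = (((↑aC ∩ ↑bC : Multiset Char)).card : Int) := by
  unfold pvInterSum
  rw [PySem.List.foldl_add
    (g := fun x => min (rest.getD x 0) (rem.getD x 0 - (if x = c then 1 else 0)))]
  have hmap : rest.keys.map (fun x => min (rest.getD x 0) (rem.getD x 0 - (if x = c then 1 else 0)))
      = rest.keys.map (fun x => ((min (aC.count x) (bC.count x) : Nat) : Int)) := by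
    refine List.map_congr_left (fun x _ => ?_)
    rw [hrest x, hrem x, Nat.cast_min]
  rw [hmap, hkeys]
  have hnd : (PySem.Set.ofList aC).Nodup := PySem.Set.nodup_ofList aC
  rw [← List.sum_toFinset _ hnd]
  have hfin : (PySem.Set.ofList aC).toFinset = aC.toFinset := by
    ext x; simp [PySem.Set.mem_ofList]
  rw [hfin]
  rw [← pv_sum_min_eq_inter aC bC]
  push_cast
  simp

-- ---------- first hit in a weakly sorted scan = first hit in the strictly sorted dedup scan ----------
theorem pv_find_sorted_min (P : Char → Bool) (ss : List Char)
    (hs : ss.Pairwise (· ≤ ·)) (c : Char) (hf : ss.find? P = some c) :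
    ∀ d ∈ ss, P d = true → c ≤ d := by
  induction ss with
  | nil => simp at hf
  | cons a tl ih =>
    rw [List.find?_cons] at hf
    cases ha : P a with
    | true =>
      rw [ha] at hf
      obtain rfl : a = c := by simpa using hf
      intro d hd _
      rcases List.mem_cons.mp hd with rfl | hd
      · exact le_refl _
      · exact (List.pairwise_cons.mp hs).1 d hd
    | false =>
      rw [ha] at hf
      intro d hd hPd
      rcases List.mem_cons.mp hd with rfl | hd
      · exact absurd hPd (by simp [ha])
      · exact ih (List.pairwise_cons.mp hs).2 hf d hd hPd

theorem pv_find_strict_first (Q : Char → Bool) (cand : List Char)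
    (hc : cand.Pairwise (· < ·)) (c : Char) (hmem : c ∈ cand) (hQ : Q c = true)
    (hmin : ∀ d ∈ cand, Q d = true → c ≤ d) :
    cand.find? Q = some c := by
  induction cand with
  | nil => simp at hmem
  | cons a tl ih =>
    rw [List.find?_cons]
    rcases List.mem_cons.mp hmem with rfl | hmem'
    · rw [hQ]
    · have hac : a < c := (List.pairwise_cons.mp hc).1 c hmem'
      have hQa : Q a = false := by
        cases hqa : Q a with
        | false => rfl
        | true => exact absurd (hmin a (List.mem_cons_self) hqa) (by simp [hac.not_ge])
      rw [hQa]
      exact ih (List.pairwise_cons.mp hc).2 hmem'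
        (fun d hd hQd => hmin d (List.mem_cons_of_mem a hd) hQd)

theorem pv_find_agree (P Q : Char → Bool) (ss cand : List Char)
    (hss : ss.Pairwise (· ≤ ·)) (hcand : cand.Pairwise (· < ·))
    (hsub : ∀ x ∈ ss, x ∈ cand)
    (hPQ : ∀ x ∈ ss, P x = Q x)
    (hQss : ∀ x, Q x = true → x ∈ ss) :
    ss.find? P = cand.find? Q := by
  cases hf : ss.find? P with
  | none =>
    symm
    rw [List.find?_eq_none] at hf ⊢
    intro x hx hQx
    exact hf x (hQss x hQx) (by rw [hPQ x (hQss x hQx)]; exact hQx)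
  | some c =>
    have hcm : c ∈ ss := List.mem_of_find?_eq_some hf
    have hPc : P c = true := List.find?_some hf
    have hQc : Q c = true := by rw [← hPQ c hcm]; exact hPc
    symm
    refine pv_find_strict_first Q cand hcand c (hsub c hcm) hQc ?_
    intro d hd hQd
    have hdss : d ∈ ss := hQss d hQd
    exact pv_find_sorted_min P ss hss c hf d hdss (by rw [hPQ d hdss]; exact hQd)

-- ---------- the two candidate tests agree under the invariant ----------
theorem pv_pred_eq (cs : List Char) (k : Int) (ss t : List Char)
    (rem : PySem.Dict Char Int) (acc : Int)
    (inv : PvInv cs ss rem t acc) (c : Char) (hc : c ∈ ss) :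
    pvIsAble cs (PySem.Dict.counter cs) k t c ss
      = pvTestB cs k (PySem.Dict.counter (PySem.List.slice cs (some ((t.length : Int) + 1)) none))
          rem t.length acc c := by
  have hcntpos : 0 < ss.count c := List.count_pos_iff.mpr hc
  have hpos : t.length < cs.length := by
    have h1 : 0 < ss.length := List.length_pos_of_mem hc
    have := inv.len
    omega
  have hslice : PySem.List.slice cs (some ((t.length : Int) + 1)) none
      = cs.drop (t.length + 1) := by
    rw [PySem.List.slice_from cs (by positivity)]
    norm_num
  -- A's counter guard always passes for c ∈ ss …
  have hguardA : ¬ ((PySem.Dict.counter cs).getD c 0 ≤ (PySem.Dict.counter t).getD c 0) := by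
    rw [PySem.Dict.getD_counter, PySem.Dict.getD_counter]
    have := inv.split c
    omega
  -- … and B's zero guard too
  have hguardB : ¬ (rem.getD c 0 ≤ 0) := by
    rw [inv.count c]; omega
  -- the incremental first diff
  have hget : PySem.List.pyGetD cs (t.length : Int) ' ' = cs[t.length]'hpos := by
    rw [PySem.List.pyGetD_natCast]
    exact List.getD_eq_getElem cs ' ' hpos
  have hd1 : pvCountDiff (t ++ [c]) (PySem.List.slice cs none (some ((t.length : Int) + 1)))
      = acc + (if c ≠ PySem.List.pyGetD cs (t.length : Int) ' ' then 1 else 0) := by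
    have htake : PySem.List.slice cs none (some ((t.length : Int) + 1))
        = cs.take (t.length + 1) := by
      rw [PySem.List.slice_to cs (by positivity)]
      norm_num
    rw [htake, pv_cd_eq _ _ (by simp; omega),
        pv_mdiff_take _ _ _ (by simp),
        pv_mdiff_append t cs c hpos, inv.accEq, hget]
  -- the two suffix-matching counts
  have hrem' : PySem.List.remove? ss c = some (ss.erase c) :=
    PySem.List.remove?_eq_some_erase ss c hc
  have hlenrest : (cs.drop (t.length + 1)).length = cs.length - (t.length + 1) := by simp
  have hlenerase : (ss.erase c).length = ss.length - 1 := List.length_erase_of_mem hc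
  have hcsc : pvCountSame (cs.drop (t.length + 1)) (ss.erase c)
      = ((↑(cs.drop (t.length + 1)) ∩ ↑(ss.erase c) : Multiset Char)).card := by
    refine pv_csc_eq _ _ ?_
    have := inv.len
    omega
  have hinter : pvInterSum (PySem.Dict.counter (cs.drop (t.length + 1))) rem c
      = (((↑(cs.drop (t.length + 1)) ∩ ↑(ss.erase c) : Multiset Char)).card : Int) := by
    refine pv_interSum_eq _ _ _ _ _ (PySem.Dict.keys_counter _) (PySem.Dict.getD_counter _) ?_
    intro x
    by_cases hx : x = c
    · subst hx
      rw [if_pos rfl, inv.count x, List.count_erase_self]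
      omega
    · rw [if_neg hx, inv.count x, List.count_erase_of_ne hx]
      omega
  -- assemble
  have hL : ((cs.drop (t.length + 1)).length : Int)
      = (cs.length : Int) - (t.length : Int) - 1 := by
    rw [hlenrest]; omega
  unfold pvIsAble pvTestB
  rw [if_neg hguardA, if_neg hguardB, hslice, hrem']
  simp only [hd1, hcsc, hinter, hL]

-- B's test only fires on characters still available
theorem pv_testB_mem (cs : List Char) (k : Int) (ss t : List Char)
    (rem : PySem.Dict Char Int) (acc : Int) (rest : PySem.Dict Char Int)
    (inv : PvInv cs ss rem t acc) (c : Char)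
    (h : pvTestB cs k rest rem t.length acc c = true) : c ∈ ss := by
  unfold pvTestB at h
  by_cases hg : rem.getD c 0 ≤ 0
  · rw [if_pos hg] at h; simp at h
  · rw [inv.count c] at hg
    exact List.count_pos_iff.mp (by omega)

-- ---------- one outer iteration preserves the state relation ----------
theorem pv_step (cs : List Char) (k : Int) (ss t : List Char)
    (rem : PySem.Dict Char Int) (acc : Int)
    (inv : PvInv cs ss rem t acc) :
    (pvStepA cs (PySem.Dict.counter cs) k (t, ss)).1
        = (pvStepB cs k (PySem.List.sorted (PySem.Dict.counter cs).keys (fun x => x) false)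
            (t, rem, acc)).1
      ∧ PvInv cs (pvStepA cs (PySem.Dict.counter cs) k (t, ss)).2
          (pvStepB cs k (PySem.List.sorted (PySem.Dict.counter cs).keys (fun x => x) false)
            (t, rem, acc)).2.1
          (pvStepA cs (PySem.Dict.counter cs) k (t, ss)).1
          (pvStepB cs k (PySem.List.sorted (PySem.Dict.counter cs).keys (fun x => x) false)
            (t, rem, acc)).2.2 := by
  have hcand : (PySem.List.sorted (PySem.Dict.counter cs).keys (fun x => x) false).Pairwise (· < ·) := by
    rw [PySem.Dict.keys_counter]
    exact PySem.List.sorted_ofList_pairwise_lt cs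
  have hfind : ss.find? (fun c => pvIsAble cs (PySem.Dict.counter cs) k t c ss)
      = (PySem.List.sorted (PySem.Dict.counter cs).keys (fun x => x) false).find?
          (fun c => pvTestB cs k
            (PySem.Dict.counter (PySem.List.slice cs (some ((t.length : Int) + 1)) none))
            rem t.length acc c) := by
    refine pv_find_agree _ _ _ _ inv.sorted hcand ?_ ?_ ?_
    · intro x hx
      rw [PySem.List.mem_sorted, PySem.Dict.keys_counter, PySem.Set.mem_ofList]
      exact inv.sub x hx
    · intro x hx
      exact pv_pred_eq cs k ss t rem acc inv x hx
    · intro x hx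
      exact pv_testB_mem cs k ss t rem acc _ inv x hx
  unfold pvStepA pvStepB
  simp only []
  rw [hfind]
  cases hf : (PySem.List.sorted (PySem.Dict.counter cs).keys (fun x => x) false).find?
      (fun c => pvTestB cs k
        (PySem.Dict.counter (PySem.List.slice cs (some ((t.length : Int) + 1)) none))
        rem t.length acc c) with
  | none => exact ⟨rfl, inv⟩
  | some c =>
    have hcss : c ∈ ss := by
      have h1 : ss.find? (fun c => pvIsAble cs (PySem.Dict.counter cs) k t c ss) = some c := by
        rw [hfind, hf]
      exact List.mem_of_find?_eq_some h1
    have hpos : t.length < cs.length := by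
      have h1 : 0 < ss.length := List.length_pos_of_mem hcss
      have := inv.len
      omega
    have hrem' : (PySem.List.remove? ss c).getD ss = ss.erase c := by
      rw [PySem.List.remove?_eq_some_erase ss c hcss]; rfl
    dsimp only
    rw [hrem']
    refine ⟨rfl, ?_⟩
    refine ⟨?_, ?_, ?_, ?_, ?_, ?_⟩
    · exact inv.sorted.sublist (List.erase_sublist ..)
    · intro x
      rw [PySem.Dict.getD_modify]
      by_cases hx : x = c
      · subst hx
        rw [if_pos rfl, inv.count x, List.count_erase_self]
        have : 0 < ss.count x := List.count_pos_iff.mpr hcss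
        omega
      · rw [if_neg hx, inv.count x, List.count_erase_of_ne hx]
    · intro x hx
      exact inv.sub x ((List.erase_sublist ..).mem hx)
    · rw [pv_mdiff_append t cs c hpos, inv.accEq]
      congr 2
      rw [PySem.List.pyGetD_natCast]
      rw [List.getD_eq_getElem cs ' ' hpos]
    · have := inv.len
      have h1 : (ss.erase c).length = ss.length - 1 := List.length_erase_of_mem hcss
      have h2 : 0 < ss.length := List.length_pos_of_mem hcss
      rw [List.length_append, h1]
      simp only [List.length_cons, List.length_nil]
      omega
    · intro x
      have hsp := inv.split x
      rw [List.count_append]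
      by_cases hx : x = c
      · subst hx
        have h3 : 0 < ss.count x := List.count_pos_iff.mpr hcss
        rw [List.count_erase_self]
        simp only [List.count_singleton, beq_self_eq_true, if_true]
        omega
      · rw [List.count_erase_of_ne hx]
        have hbe : (c == x) = false := beq_eq_false_iff_ne.mpr (fun h => hx h.symm)
        simp only [List.count_singleton, hbe, Bool.false_eq_true, if_false]
        omega

-- ---------- the whole loop, over any iteration list ----------
theorem pv_loop (cs : List Char) (k : Int) (L : List Int) :
    ∀ (t ss : List Char) (rem : PySem.Dict Char Int) (acc : Int),
    PvInv cs ss rem t acc →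
    (L.foldl (fun st _ => pvStepA cs (PySem.Dict.counter cs) k st) (t, ss)).1
      = (L.foldl (fun st _ => pvStepB cs k
          (PySem.List.sorted (PySem.Dict.counter cs).keys (fun x => x) false) st)
          (t, rem, acc)).1 := by
  induction L with
  | nil => intro t ss rem acc _; rfl
  | cons i L ih =>
    intro t ss rem acc inv
    rw [List.foldl_cons, List.foldl_cons]
    obtain ⟨heq, inv'⟩ := pv_step cs k ss t rem acc inv
    set a' := pvStepA cs (PySem.Dict.counter cs) k (t, ss) with ha'
    set b' := pvStepB cs k
      (PySem.List.sorted (PySem.Dict.counter cs).keys (fun x => x) false) (t, rem, acc) with hb'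
    have := ih a'.1 a'.2 b'.2.1 b'.2.2 (heq ▸ inv')
    calc (L.foldl (fun st _ => pvStepA cs (PySem.Dict.counter cs) k st) (a'.1, a'.2)).1
        = (L.foldl (fun st _ => pvStepB cs k
            (PySem.List.sorted (PySem.Dict.counter cs).keys (fun x => x) false) st)
            (a'.1, b'.2.1, b'.2.2)).1 := this
      _ = (L.foldl (fun st _ => pvStepB cs k
            (PySem.List.sorted (PySem.Dict.counter cs).keys (fun x => x) false) st)
            (b'.1, b'.2.1, b'.2.2)).1 := by rw [heq]

theorem pv_main (n k : Int) (s : String) : search n k s = search_alt n k s := by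
  unfold search search_alt
  simp only []
  congr 1
  refine pv_loop s.toList k (PySem.List.pyRange 0 n 1) [] _ _ 0 ?_
  refine ⟨PySem.List.sorted_pairwise s.toList (fun x => x), ?_, ?_, ?_, ?_, ?_⟩
  · intro x
    rw [PySem.Dict.getD_counter]
    congr 1
    exact ((PySem.List.sorted_perm s.toList (fun x => x) false).count_eq x).symm
  · intro x hx
    exact (PySem.List.mem_sorted _ _ _ _).mp hx
  · simp [pvMdiff]
  · simp [PySem.List.length_sorted]
  · intro x
    simp only [List.count_nil]
    rw [(PySem.List.sorted_perm s.toList (fun x => x) false).count_eq x]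
    omega

-- ===== VERDICT (by name: the statement is the Claim_ definition above) =====
theorem search_spec : Claim_equal_search := by
  intro n k s _
  unfold Spec_search
  exact pv_main n k s
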